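-- pv_equiv track=rewrite | github.com/the-omega-institute/automath | theory/2026_golden_ratio_driven_scan_projection_generation_recursive_emergence/scripts/exp_fold_zm_elliptic_rational_fiber_cubic_factor_audit.py | _irreducible_mod_p_cubic
-- ===== SOURCE A (Python) =====
-- from typing import Dict, List, Optional, Tuple
--
-- def _irreducible_mod_p_cubic(A: int, B: int, C: int, D: int, p: int) -> Optional[bool]:
--     """Return True/False if reduction mod p is cubic and (ir)reducible, else None if deg drops."""
--     a3 = A % p
--     a2 = B % p
--     a1 = C % p
--     a0 = D % p
--     if a3 == 0:
--         return None
--     # cubic over F_p is reducible iff it has a root in F_p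
--     for t in range(p):
--         val = (((a3 * t + a2) * t + a1) * t + a0) % p
--         if val == 0:
--             return False
--     return True
-- ===== SOURCE B (Python) =====
-- def _irreducible_mod_p_cubic(A: int, B: int, C: int, D: int, p: int):
--     """Finite-difference scan: maintain f(t), delta f, delta^2 f; no multiplications in the loop."""
--     a3 = A % p
--     a2 = B % p
--     a1 = C % p
--     a0 = D % p
--     if a3 == 0:
--         return None
--     v = a0 % p                 # f(0) mod p
--     d1 = a3 + a2 + a1          # f(t+1) - f(t) at t = 0
--     d2 = 6 * a3 + 2 * a2       # second difference at t = 0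
--     d3 = 6 * a3                # constant third difference of a cubic
--     for _ in range(p):
--         if v == 0:
--             return False
--         v = (v + d1) % p
--         d1 += d2
--         d2 += d3
--     return True
-- ===== Notes on version B (the rewrite author's own statement) =====
-- stated objective: faster
-- what changed: Replaces per-iteration Horner evaluation (three multiplications per t) by a finite-difference scan that maintains f(t), its first and second differences, advancing with additions only.
import Mathlib
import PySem

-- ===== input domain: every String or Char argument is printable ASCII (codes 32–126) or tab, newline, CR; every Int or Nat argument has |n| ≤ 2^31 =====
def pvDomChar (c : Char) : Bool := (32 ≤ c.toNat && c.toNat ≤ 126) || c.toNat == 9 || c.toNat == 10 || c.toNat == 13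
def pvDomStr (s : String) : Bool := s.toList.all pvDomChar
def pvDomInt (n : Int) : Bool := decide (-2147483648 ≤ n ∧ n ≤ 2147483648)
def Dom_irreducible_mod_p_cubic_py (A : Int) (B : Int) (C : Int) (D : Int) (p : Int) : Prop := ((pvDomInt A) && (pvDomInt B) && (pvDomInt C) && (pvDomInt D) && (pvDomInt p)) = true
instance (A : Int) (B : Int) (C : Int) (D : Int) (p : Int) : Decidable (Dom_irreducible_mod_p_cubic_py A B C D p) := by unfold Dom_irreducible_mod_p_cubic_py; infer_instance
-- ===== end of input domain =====

-- B replaces A's per-t Horner evaluation (three multiplications per step) by a finite-difference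
-- scan of the cubic (additions only in the loop); same return value on every input with p ≠ 0.

-- ===== PORT A =====
-- the 'for t in range(p)' loop of A: first t with Horner value ≡ 0 (mod p) → False, else True
def pvALoop (a3 a2 a1 a0 p : Int) : List Int → Option Bool
  | [] => some true
  | t :: ts =>
    if PySem.Int.mod (((a3 * t + a2) * t + a1) * t + a0) p = 0 then some false
    else pvALoop a3 a2 a1 a0 p ts

def irreducible_mod_p_cubic_py (A : Int) (B : Int) (C : Int) (D : Int) (p : Int) : Option Bool :=
  let a3 := PySem.Int.mod A p
  let a2 := PySem.Int.mod B p
  let a1 := PySem.Int.mod C p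
  let a0 := PySem.Int.mod D p
  if a3 = 0 then none
  else pvALoop a3 a2 a1 a0 p (PySem.List.pyRange 0 p 1)

-- ===== PORT B =====
-- the 'for _ in range(p)' loop of B: n iterations left, state (v, d1, d2); d3 is loop-invariant
def pvBLoop (p d3 : Int) : Nat → Int → Int → Int → Option Bool
  | 0, _, _, _ => some true
  | n + 1, v, d1, d2 =>
    if v = 0 then some false
    else pvBLoop p d3 n (PySem.Int.mod (v + d1) p) (d1 + d2) (d2 + d3)

def irreducible_mod_p_cubic_py_alt (A : Int) (B : Int) (C : Int) (D : Int) (p : Int) : Option Bool :=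
  let a3 := PySem.Int.mod A p
  let a2 := PySem.Int.mod B p
  let a1 := PySem.Int.mod C p
  let a0 := PySem.Int.mod D p
  if a3 = 0 then none
  else pvBLoop p (6 * a3) p.toNat (PySem.Int.mod a0 p) (a3 + a2 + a1) (6 * a3 + 2 * a2)

-- ===== PRECONDITION & SPEC =====
-- Pre_ excludes exactly p = 0, where Python's 'A % p' raises ZeroDivisionError in both programs.
def Pre_irreducible_mod_p_cubic_py (A : Int) (B : Int) (C : Int) (D : Int) (p : Int) : Prop := p ≠ 0
instance (A : Int) (B : Int) (C : Int) (D : Int) (p : Int) : Decidable (Pre_irreducible_mod_p_cubic_py A B C D p) := by unfold Pre_irreducible_mod_p_cubic_py; infer_instance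

def pvWitness_irreducible_mod_p_cubic_py : Int × Int × Int × Int × Int := (1, 0, 0, 1, 5)

def Spec_irreducible_mod_p_cubic_py (A : Int) (B : Int) (C : Int) (D : Int) (p : Int) (out : Option Bool) : Prop := out = irreducible_mod_p_cubic_py_alt A B C D p
instance (A : Int) (B : Int) (C : Int) (D : Int) (p : Int) (out : Option Bool) : Decidable (Spec_irreducible_mod_p_cubic_py A B C D p out) := by unfold Spec_irreducible_mod_p_cubic_py; infer_instance

-- ===== CLAIM (what is proved, stated in full; the proofs are below) =====
def Claim_equal_irreducible_mod_p_cubic_py : Prop := ∀ (A : Int) (B : Int) (C : Int) (D : Int) (p : Int), Dom_irreducible_mod_p_cubic_py A B C D p → Pre_irreducible_mod_p_cubic_py A B C D p → Spec_irreducible_mod_p_cubic_py A B C D p (irreducible_mod_p_cubic_py A B C D p)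

-- ===== LEMMAS AND PROOFS =====

-- the cubic and its first/second forward differences (proof-only helpers)
def pvF (a3 a2 a1 a0 t : Int) : Int := ((a3 * t + a2) * t + a1) * t + a0
def pvG (a3 a2 a1 t : Int) : Int := 3 * a3 * t ^ 2 + 3 * a3 * t + a3 + 2 * a2 * t + a2 + a1
def pvH (a3 a2 t : Int) : Int := 6 * a3 * t + 6 * a3 + 2 * a2

-- loop invariant: B's state at n iterations remaining is (F t mod p, G t, H t) with t + n = p
lemma pvLoop_eq (a3 a2 a1 a0 p : Int) (hp : 0 < p) :
    ∀ (n : Nat) (t : Int), t + n = p →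
      pvALoop a3 a2 a1 a0 p (PySem.List.pyRange t p 1)
        = pvBLoop p (6 * a3) n (PySem.Int.mod (pvF a3 a2 a1 a0 t) p) (pvG a3 a2 a1 t) (pvH a3 a2 t) := by
  intro n
  induction n with
  | zero =>
    intro t ht
    have : p ≤ t := by omega
    rw [PySem.List.pyRange_one_eq_nil this]
    rfl
  | succ n ih =>
    intro t ht
    have hlt : t < p := by omega
    rw [PySem.List.pyRange_one_cons hlt]
    show (if PySem.Int.mod (((a3 * t + a2) * t + a1) * t + a0) p = 0 then some false
          else pvALoop a3 a2 a1 a0 p (PySem.List.pyRange (t + 1) p 1)) = _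
    rw [pvBLoop]
    by_cases h0 : PySem.Int.mod (pvF a3 a2 a1 a0 t) p = 0
    · simp [pvF] at h0 ⊢
      simp [h0]
    · have hA : ¬ PySem.Int.mod (((a3 * t + a2) * t + a1) * t + a0) p = 0 := by
        simpa [pvF] using h0
      rw [if_neg hA, if_neg h0]
      have hstep : PySem.Int.mod (PySem.Int.mod (pvF a3 a2 a1 a0 t) p + pvG a3 a2 a1 t) p
          = PySem.Int.mod (pvF a3 a2 a1 a0 (t + 1)) p := by
        simp only [PySem.Int.mod_eq_emod_of_pos hp]
        rw [Int.emod_add_emod]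
        have : pvF a3 a2 a1 a0 t + pvG a3 a2 a1 t = pvF a3 a2 a1 a0 (t + 1) := by
          simp [pvF, pvG]; ring
        rw [this]
      have hG : pvG a3 a2 a1 t + pvH a3 a2 t = pvG a3 a2 a1 (t + 1) := by
        simp [pvG, pvH]; ring
      have hH : pvH a3 a2 t + 6 * a3 = pvH a3 a2 (t + 1) := by
        simp [pvH]; ring
      rw [hstep, hG, hH]
      exact ih (t + 1) (by omega)

-- ===== VERDICT (by name: the statement is the Claim_ definition above) =====
theorem irreducible_mod_p_cubic_py_spec : Claim_equal_irreducible_mod_p_cubic_py := by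
  intro A B C D p _ hp
  show irreducible_mod_p_cubic_py A B C D p = irreducible_mod_p_cubic_py_alt A B C D p
  unfold irreducible_mod_p_cubic_py irreducible_mod_p_cubic_py_alt
  by_cases h3 : PySem.Int.mod A p = 0
  · simp [h3]
  · simp only [h3]
    rcases lt_or_gt_of_ne hp with hneg | hpos
    · -- p < 0: range is empty and p.toNat = 0; both loops return immediately
      rw [PySem.List.pyRange_one_eq_nil (by omega : p ≤ 0)]
      have : p.toNat = 0 := by omega
      rw [this]
      rfl
    · -- p > 0: the invariant at t = 0, n = p.toNat
      have h := pvLoop_eq (PySem.Int.mod A p) (PySem.Int.mod B p) (PySem.Int.mod C p)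
        (PySem.Int.mod D p) p hpos p.toNat 0 (by omega)
      simpa [pvF, pvG, pvH] using h
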